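-- pv_equiv track=rewrite | github.com/Felipe-Aquino/aoc2025 | src/day04.py | count_remove_and_accessable_rolls
-- ===== SOURCE A (Python) =====
-- def count_remove_and_accessable_rolls(lines, nlines, ncols):
--     accessable_rolls_count = 0
--
--     remove_list = []
--
--     for i in range(nlines):
--         line = lines[i]
--
--         for j in range(ncols):
--             if line[j] == 1:
--                 roll_count = 0
--
--                 if j > 0 and lines[i][j - 1] == 1:
--                     roll_count += 1
--                 if j < ncols - 1 and lines[i][j + 1] == 1:
--                     roll_count += 1
--
--                 if i > 0:
--                     prev = lines[i - 1]
--                     if prev[j] == 1: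
--                         roll_count += 1
--
--                     if j > 0 and prev[j - 1] == 1:
--                         roll_count += 1
--                     if j < ncols - 1 and prev[j + 1] == 1:
--                         roll_count += 1
--
--                 if i < nlines - 1:
--                     next = lines[i + 1]
--                     if next[j] == 1:
--                         roll_count += 1
--
--                     if j > 0 and next[j - 1] == 1:
--                         roll_count += 1
--                     if j < ncols - 1 and next[j + 1] == 1:
--                         roll_count += 1
--
--                 if roll_count < 4:
--                     accessable_rolls_count += 1
--                     remove_list.append((i, j))
--
--     for i, j in remove_list:
--         lines[i][j] = 0
--
--     return accessable_rolls_count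
-- ===== SOURCE B (Python) =====
-- OFFSETS = [(-1, -1), (-1, 0), (-1, 1), (0, -1), (0, 1), (1, -1), (1, 0), (1, 1)]
--
-- def count_remove_and_accessable_rolls(lines, nlines, ncols):
--     # Scatter pass: every roll adds 1 to the neighbor count of each in-bounds
--     # neighbor position; counts is a sparse table keyed by position.
--     counts = {}
--     for i in range(nlines):
--         for j in range(ncols):
--             if lines[i][j] == 1:
--                 for di, dj in OFFSETS:
--                     ni = i + di
--                     nj = j + dj
--                     if 0 <= ni and ni < nlines and 0 <= nj and nj < ncols:
--                         counts[(ni, nj)] = counts.get((ni, nj), 0) + 1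
--     # Gather pass: a roll is accessible iff fewer than 4 rolls landed on it.
--     accessable_rolls_count = 0
--     remove_list = []
--     for i in range(nlines):
--         for j in range(ncols):
--             if lines[i][j] == 1 and counts.get((i, j), 0) < 4:
--                 accessable_rolls_count += 1
--                 remove_list.append((i, j))
--     for i, j in remove_list:
--         lines[i][j] = 0
--     return accessable_rolls_count
-- ===== Notes on version B (the rewrite author's own statement) =====
-- stated objective: alternative
-- what changed: A gathers: for each roll it probes its 8 neighbours with unrolled boundary-guarded lookups; B instead scatters: one pass adds 1 to a sparse neighbour-count dictionary entry for every in-bounds neighbour of each roll, and a second pass just looks each roll's count up.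
import Mathlib
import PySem

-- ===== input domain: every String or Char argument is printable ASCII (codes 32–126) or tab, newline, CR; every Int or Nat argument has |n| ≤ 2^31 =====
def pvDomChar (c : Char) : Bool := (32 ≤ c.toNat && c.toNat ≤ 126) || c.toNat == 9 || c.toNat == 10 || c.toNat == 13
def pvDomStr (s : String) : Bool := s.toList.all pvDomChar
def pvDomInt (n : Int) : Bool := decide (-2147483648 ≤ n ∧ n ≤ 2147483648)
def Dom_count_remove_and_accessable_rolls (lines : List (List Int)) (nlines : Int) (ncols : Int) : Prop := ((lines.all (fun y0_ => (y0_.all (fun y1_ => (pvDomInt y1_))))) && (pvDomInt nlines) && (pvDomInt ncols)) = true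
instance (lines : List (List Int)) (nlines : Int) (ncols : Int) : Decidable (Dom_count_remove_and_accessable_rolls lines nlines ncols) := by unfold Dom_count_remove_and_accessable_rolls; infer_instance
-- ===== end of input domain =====

-- B replaces A's 8 unrolled per-cell neighbour probes (gather) by a scatter into a sparse
-- neighbour-count dictionary built in one pass (alternative decomposition, same asymptotic cost).
-- Both Pythons also zero the removed cells of `lines` in place after counting; that mutation
-- cannot change the returned count and only the return value is modeled here.

-- ===== PORT A =====
def count_remove_and_accessable_rolls (lines : List (List Int)) (nlines : Int) (ncols : Int) : Int :=
  ((PySem.List.pyRange 0 nlines 1).foldl (fun st i =>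
      let line := PySem.List.pyGetD lines i []
      (PySem.List.pyRange 0 ncols 1).foldl (fun st j =>
        if PySem.List.pyGetD line j 0 = 1 then
          let rc : Int := 0
          let rc := if 0 < j ∧ PySem.List.pyGetD (PySem.List.pyGetD lines i []) (j - 1) 0 = 1 then rc + 1 else rc
          let rc := if j < ncols - 1 ∧ PySem.List.pyGetD (PySem.List.pyGetD lines i []) (j + 1) 0 = 1 then rc + 1 else rc
          let rc :=
            if 0 < i then
              let prev := PySem.List.pyGetD lines (i - 1) []
              let rc := if PySem.List.pyGetD prev j 0 = 1 then rc + 1 else rc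
              let rc := if 0 < j ∧ PySem.List.pyGetD prev (j - 1) 0 = 1 then rc + 1 else rc
              if j < ncols - 1 ∧ PySem.List.pyGetD prev (j + 1) 0 = 1 then rc + 1 else rc
            else rc
          let rc :=
            if i < nlines - 1 then
              let nxt := PySem.List.pyGetD lines (i + 1) []
              let rc := if PySem.List.pyGetD nxt j 0 = 1 then rc + 1 else rc
              let rc := if 0 < j ∧ PySem.List.pyGetD nxt (j - 1) 0 = 1 then rc + 1 else rc
              if j < ncols - 1 ∧ PySem.List.pyGetD nxt (j + 1) 0 = 1 then rc + 1 else rc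
            else rc
          if rc < 4 then (st.1 + 1, st.2 ++ [(i, j)]) else st
        else st) st)
    ((0 : Int), ([] : List (Int × Int)))).1

-- ===== PORT B =====
def pvOffsets : List (Int × Int) := [(-1, -1), (-1, 0), (-1, 1), (0, -1), (0, 1), (1, -1), (1, 0), (1, 1)]

-- scatter pass: every roll adds 1 to the count of each in-bounds neighbour position
def pvCounts (lines : List (List Int)) (nlines : Int) (ncols : Int) : PySem.Dict (Int × Int) Int :=
  (PySem.List.pyRange 0 nlines 1).foldl (fun d i =>
    (PySem.List.pyRange 0 ncols 1).foldl (fun d j =>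
      if PySem.List.pyGetD (PySem.List.pyGetD lines i []) j 0 = 1 then
        pvOffsets.foldl (fun d off =>
          let ni := i + off.1
          let nj := j + off.2
          if 0 ≤ ni ∧ ni < nlines ∧ 0 ≤ nj ∧ nj < ncols then d.modify (ni, nj) 0 (· + 1)
          else d) d
      else d) d) PySem.Dict.empty

def count_remove_and_accessable_rolls_alt (lines : List (List Int)) (nlines : Int) (ncols : Int) : Int :=
  let counts := pvCounts lines nlines ncols
  ((PySem.List.pyRange 0 nlines 1).foldl (fun st i =>
      (PySem.List.pyRange 0 ncols 1).foldl (fun st j =>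
        if PySem.List.pyGetD (PySem.List.pyGetD lines i []) j 0 = 1 ∧ counts.getD (i, j) 0 < 4 then
          (st.1 + 1, st.2 ++ [(i, j)])
        else st) st)
    ((0 : Int), ([] : List (Int × Int)))).1

-- ===== PRECONDITION & SPEC =====
-- Pre_ excludes exactly the inputs where Python A raises IndexError: a row index below nlines
-- outside lines, or (when the column loop runs at all) an accessed row shorter than ncols.
def Pre_count_remove_and_accessable_rolls (lines : List (List Int)) (nlines : Int) (ncols : Int) : Prop :=
  nlines ≤ (lines.length : Int) ∧
    ∀ row ∈ lines.take nlines.toNat, 0 < ncols → ncols ≤ (row.length : Int)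
instance (lines : List (List Int)) (nlines : Int) (ncols : Int) : Decidable (Pre_count_remove_and_accessable_rolls lines nlines ncols) := by unfold Pre_count_remove_and_accessable_rolls; infer_instance

def pvWitness_count_remove_and_accessable_rolls : List (List Int) × Int × Int := ([[1, 1, 0], [0, 1, 1]], 2, 3)

def Spec_count_remove_and_accessable_rolls (lines : List (List Int)) (nlines : Int) (ncols : Int) (out : Int) : Prop := out = count_remove_and_accessable_rolls_alt lines nlines ncols
instance (lines : List (List Int)) (nlines : Int) (ncols : Int) (out : Int) : Decidable (Spec_count_remove_and_accessable_rolls lines nlines ncols out) := by unfold Spec_count_remove_and_accessable_rolls; infer_instance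

-- ===== CLAIM (what is proved, stated in full; the proofs are below) =====
def Claim_equal_count_remove_and_accessable_rolls : Prop := ∀ (lines : List (List Int)) (nlines : Int) (ncols : Int), Dom_count_remove_and_accessable_rolls lines nlines ncols → Pre_count_remove_and_accessable_rolls lines nlines ncols → Spec_count_remove_and_accessable_rolls lines nlines ncols (count_remove_and_accessable_rolls lines nlines ncols)

-- ===== LEMMAS AND PROOFS =====

-- the value of cell (i, j), as both ports read it
def pvVal (lines : List (List Int)) (i j : Int) : Int :=
  PySem.List.pyGetD (PySem.List.pyGetD lines i []) j 0

theorem pvVal_def (lines : List (List Int)) (i j : Int) :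
    PySem.List.pyGetD (PySem.List.pyGetD lines i []) j 0 = pvVal lines i j := rfl

-- canonical "one if cell (a,b) is an in-bounds roll" term
def pvT (lines : List (List Int)) (nlines ncols a b : Int) : Int :=
  if 0 ≤ a ∧ a < nlines ∧ 0 ≤ b ∧ b < ncols then (if pvVal lines a b = 1 then 1 else 0) else 0

theorem pv_getD_modify_one (d : PySem.Dict (Int × Int) Int) (k v : Int × Int) :
    (d.modify k 0 (· + 1)).getD v 0 = d.getD v 0 + (if k = v then 1 else 0) := by
  have h := PySem.Dict.getD_foldl_modify_add_one [k] d v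
  simp only [List.foldl, List.count_singleton] at h
  rw [h]
  by_cases hkv : k = v <;> simp [hkv]

theorem pv_step1 (P : Prop) [Decidable P] (d : PySem.Dict (Int × Int) Int) (k v : Int × Int) :
    (if P then d.modify k 0 (· + 1) else d).getD v 0
      = d.getD v 0 + (if P ∧ k = v then 1 else 0) := by
  by_cases hP : P
  · simp [hP, pv_getD_modify_one]
  · simp [hP]

theorem pv_foldl_getD_sum {α : Type} (F : PySem.Dict (Int × Int) Int → α → PySem.Dict (Int × Int) Int)
    (c : α → Int) (v : Int × Int)
    (h : ∀ d x, (F d x).getD v 0 = d.getD v 0 + c x) :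
    ∀ (l : List α) (d : PySem.Dict (Int × Int) Int),
      (l.foldl F d).getD v 0 = d.getD v 0 + (l.map c).sum := by
  intro l
  induction l with
  | nil => intro d; simp
  | cons x xs ih => intro d; simp only [List.foldl, List.map, List.sum_cons]; rw [ih, h]; ring

-- contribution of cell (i, j)'s scatter step to the count at v
def pvContrib (lines : List (List Int)) (nlines ncols : Int) (v : Int × Int) (i j : Int) : Int :=
  (pvOffsets.map (fun off =>
    if pvVal lines i j = 1 ∧ (0 ≤ i + off.1 ∧ i + off.1 < nlines ∧ 0 ≤ j + off.2 ∧ j + off.2 < ncols) ∧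
        ((i + off.1, j + off.2) : Int × Int) = v then (1 : Int) else 0)).sum

theorem pv_cell_getD (lines : List (List Int)) (nlines ncols : Int) (v : Int × Int) (i j : Int)
    (d : PySem.Dict (Int × Int) Int) :
    ((if PySem.List.pyGetD (PySem.List.pyGetD lines i []) j 0 = 1 then
        pvOffsets.foldl (fun d off =>
          let ni := i + off.1
          let nj := j + off.2
          if 0 ≤ ni ∧ ni < nlines ∧ 0 ≤ nj ∧ nj < ncols then d.modify (ni, nj) 0 (· + 1)
          else d) d
      else d).getD v 0)
      = d.getD v 0 + pvContrib lines nlines ncols v i j := by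
  by_cases hv : PySem.List.pyGetD (PySem.List.pyGetD lines i []) j 0 = 1
  · rw [pvVal_def] at hv
    simp only [pvVal_def, hv, if_pos, pvContrib, pvOffsets, List.foldl, List.map, List.sum_cons,
      List.sum_nil, pv_step1, true_and]
    ring
  · rw [pvVal_def] at hv
    simp [pvVal_def, hv, pvContrib, pvOffsets]

theorem pv_counts_getD (lines : List (List Int)) (nlines ncols : Int) (v : Int × Int) :
    (pvCounts lines nlines ncols).getD v 0
      = ((PySem.List.pyRange 0 nlines 1).map (fun i =>
          ((PySem.List.pyRange 0 ncols 1).map (fun j => pvContrib lines nlines ncols v i j)).sum)).sum := by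
  unfold pvCounts
  rw [pv_foldl_getD_sum _ _ v (fun d i => by
    exact pv_foldl_getD_sum _ _ v (fun d j => pv_cell_getD lines nlines ncols v i j d) _ d)]
  simp

-- a sum over range(0, n) of a function supported on the single point a
theorem pv_sum_single (n a : Int) (g : Int → Int)
    (hz : ∀ x, 0 ≤ x → x < n → x ≠ a → g x = 0) :
    ((PySem.List.pyRange 0 n 1).map g).sum = if 0 ≤ a ∧ a < n then g a else 0 := by
  by_cases h : 0 ≤ a ∧ a < n
  · rw [PySem.List.pyRange_one_append 0 a n h.1 (le_of_lt h.2),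
      PySem.List.pyRange_one_append a (a + 1) n (by omega) (by omega),
      PySem.List.pyRange_one_singleton]
    simp only [List.map_append, List.sum_append, if_pos h]
    have h1 : ((PySem.List.pyRange 0 a 1).map g).sum = 0 := by
      apply List.sum_eq_zero; intro x hx
      simp only [List.mem_map] at hx
      obtain ⟨y, hy, rfl⟩ := hx
      rw [PySem.List.mem_pyRange_one] at hy
      exact hz y hy.1 (by omega) (by omega)
    have h2 : ((PySem.List.pyRange (a + 1) n 1).map g).sum = 0 := by
      apply List.sum_eq_zero; intro x hx
      simp only [List.mem_map] at hx
      obtain ⟨y, hy, rfl⟩ := hx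
      rw [PySem.List.mem_pyRange_one] at hy
      exact hz y (by omega) hy.2 (by omega)
    rw [h1, h2]; simp
  · rw [if_neg h]
    apply List.sum_eq_zero; intro x hx
    simp only [List.mem_map] at hx
    obtain ⟨y, hy, rfl⟩ := hx
    rw [PySem.List.mem_pyRange_one] at hy
    exact hz y hy.1 hy.2 (by omega)

-- collapsing the double sum of one offset's scatter indicator to the single source cell
theorem pv_collapse (lines : List (List Int)) (nlines ncols r c di dj : Int)
    (hr : 0 ≤ r ∧ r < nlines) (hc : 0 ≤ c ∧ c < ncols) :
    ((PySem.List.pyRange 0 nlines 1).map (fun i =>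
      ((PySem.List.pyRange 0 ncols 1).map (fun j =>
        if pvVal lines i j = 1 ∧ (0 ≤ i + di ∧ i + di < nlines ∧ 0 ≤ j + dj ∧ j + dj < ncols) ∧
            ((i + di, j + dj) : Int × Int) = (r, c) then (1 : Int) else 0)).sum)).sum
      = pvT lines nlines ncols (r - di) (c - dj) := by
  have hinner : ∀ i : Int,
      ((PySem.List.pyRange 0 ncols 1).map (fun j =>
        if pvVal lines i j = 1 ∧ (0 ≤ i + di ∧ i + di < nlines ∧ 0 ≤ j + dj ∧ j + dj < ncols) ∧
            ((i + di, j + dj) : Int × Int) = (r, c) then (1 : Int) else 0)).sum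
      = if 0 ≤ c - dj ∧ c - dj < ncols then
          (if pvVal lines i (c - dj) = 1 ∧ (0 ≤ i + di ∧ i + di < nlines ∧ 0 ≤ c ∧ c < ncols) ∧
              ((i + di, c) : Int × Int) = (r, c) then (1 : Int) else 0)
        else 0 := by
    intro i
    rw [pv_sum_single ncols (c - dj) _ (by
      intro x _ _ hx
      rw [if_neg]
      rintro ⟨-, -, h⟩
      rw [Prod.mk.injEq] at h
      omega)]
    by_cases h : 0 ≤ c - dj ∧ c - dj < ncols
    · rw [if_pos h, if_pos h]
      have : c - dj + dj = c := by omega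
      rw [this]
    · rw [if_neg h, if_neg h]
  simp only [hinner]
  rw [pv_sum_single nlines (r - di) _ (by
    intro x _ _ hx
    by_cases h : 0 ≤ c - dj ∧ c - dj < ncols
    · rw [if_pos h, if_neg]
      rintro ⟨-, -, h2⟩
      rw [Prod.mk.injEq] at h2
      omega
    · rw [if_neg h])]
  have h1 : r - di + di = r := by omega
  rw [h1]
  simp only [pvT]
  obtain ⟨hr1, hr2⟩ := hr; obtain ⟨hc1, hc2⟩ := hc
  split_ifs <;> simp_all <;> omega

theorem pv_collapse_dj0 (lines : List (List Int)) (nlines ncols r c di : Int)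
    (hr : 0 ≤ r ∧ r < nlines) (hc : 0 ≤ c ∧ c < ncols) :
    ((PySem.List.pyRange 0 nlines 1).map (fun i =>
      ((PySem.List.pyRange 0 ncols 1).map (fun j =>
        if pvVal lines i j = 1 ∧ (0 ≤ i + di ∧ i + di < nlines ∧ 0 ≤ j ∧ j < ncols) ∧
            ((i + di, j) : Int × Int) = (r, c) then (1 : Int) else 0)).sum)).sum
      = pvT lines nlines ncols (r - di) c := by
  have h := pv_collapse lines nlines ncols r c di 0 hr hc
  simp only [add_zero, sub_zero] at h
  exact h

theorem pv_collapse_di0 (lines : List (List Int)) (nlines ncols r c dj : Int)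
    (hr : 0 ≤ r ∧ r < nlines) (hc : 0 ≤ c ∧ c < ncols) :
    ((PySem.List.pyRange 0 nlines 1).map (fun i =>
      ((PySem.List.pyRange 0 ncols 1).map (fun j =>
        if pvVal lines i j = 1 ∧ (0 ≤ i ∧ i < nlines ∧ 0 ≤ j + dj ∧ j + dj < ncols) ∧
            ((i, j + dj) : Int × Int) = (r, c) then (1 : Int) else 0)).sum)).sum
      = pvT lines nlines ncols r (c - dj) := by
  have h := pv_collapse lines nlines ncols r c 0 dj hr hc
  simp only [add_zero, sub_zero] at h
  exact h

-- the neighbour-count table at an in-bounds cell is the canonical 8-term neighbour sum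
theorem pv_getD_eq (lines : List (List Int)) (nlines ncols r c : Int)
    (hr : 0 ≤ r ∧ r < nlines) (hc : 0 ≤ c ∧ c < ncols) :
    (pvCounts lines nlines ncols).getD (r, c) 0
      = pvT lines nlines ncols r (c - 1) + pvT lines nlines ncols r (c + 1)
        + pvT lines nlines ncols (r - 1) c + pvT lines nlines ncols (r - 1) (c - 1)
        + pvT lines nlines ncols (r - 1) (c + 1) + pvT lines nlines ncols (r + 1) c
        + pvT lines nlines ncols (r + 1) (c - 1) + pvT lines nlines ncols (r + 1) (c + 1) := by
  rw [pv_counts_getD]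
  simp only [pvContrib, pvOffsets, List.map_cons, List.map_nil, List.sum_cons, List.sum_nil,
    add_zero]
  simp only [PySem.List.sum_map_add_int]
  rw [pv_collapse lines nlines ncols r c (-1) (-1) hr hc,
    pv_collapse_dj0 lines nlines ncols r c (-1) hr hc,
    pv_collapse lines nlines ncols r c (-1) 1 hr hc,
    pv_collapse_di0 lines nlines ncols r c (-1) hr hc,
    pv_collapse_di0 lines nlines ncols r c 1 hr hc,
    pv_collapse lines nlines ncols r c 1 (-1) hr hc,
    pv_collapse_dj0 lines nlines ncols r c 1 hr hc,
    pv_collapse lines nlines ncols r c 1 1 hr hc]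
  simp only [sub_neg_eq_add]
  ring

-- rewriting A's incremental roll_count chain into guarded indicator sums
theorem pv_ite_step (P : Prop) [Decidable P] (x : Int) :
    (if P then x + 1 else x) = x + (if P then 1 else 0) := by split_ifs <;> omega

theorem pv_ite_chain3 (P A B C : Prop) [Decidable P] [Decidable A] [Decidable B] [Decidable C]
    (x : Int) :
    (if P then
        (if C then (if B then (if A then x + 1 else x) + 1 else (if A then x + 1 else x)) + 1
         else (if B then (if A then x + 1 else x) + 1 else (if A then x + 1 else x)))
      else x)
      = x + (if P ∧ A then 1 else 0) + (if P ∧ B then 1 else 0) + (if P ∧ C then 1 else 0) := by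
  by_cases hP : P <;> by_cases hA : A <;> by_cases hB : B <;> by_cases hC : C <;>
    simp [hP, hA, hB, hC]

-- pvT as a single flat guarded indicator
theorem pvT_eq (lines : List (List Int)) (nlines ncols a b : Int) :
    pvT lines nlines ncols a b
      = if (0 ≤ a ∧ a < nlines ∧ 0 ≤ b ∧ b < ncols) ∧ pvVal lines a b = 1 then 1 else 0 := by
  unfold pvT
  split_ifs <;> simp_all

-- A's flattened roll_count expression is exactly the scatter table's entry at (i, j)
theorem pv_chain_eq_getD (lines : List (List Int)) (nlines ncols i j : Int)
    (hi : 0 ≤ i ∧ i < nlines) (hj : 0 ≤ j ∧ j < ncols) :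
    ((((((((if 0 < j ∧ pvVal lines i (j - 1) = 1 then (1 : Int) else 0) +
        if j < ncols - 1 ∧ pvVal lines i (j + 1) = 1 then 1 else 0) +
        if 0 < i ∧ pvVal lines (i - 1) j = 1 then 1 else 0) +
        if 0 < i ∧ 0 < j ∧ pvVal lines (i - 1) (j - 1) = 1 then 1 else 0) +
        if 0 < i ∧ j < ncols - 1 ∧ pvVal lines (i - 1) (j + 1) = 1 then 1 else 0) +
        if i < nlines - 1 ∧ pvVal lines (i + 1) j = 1 then 1 else 0) +
        if i < nlines - 1 ∧ 0 < j ∧ pvVal lines (i + 1) (j - 1) = 1 then 1 else 0) +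
        if i < nlines - 1 ∧ j < ncols - 1 ∧ pvVal lines (i + 1) (j + 1) = 1 then 1 else 0)
      = (pvCounts lines nlines ncols).getD (i, j) 0 := by
  rw [pv_getD_eq lines nlines ncols i j hi hj]
  simp only [pvT_eq]
  repeat
    first
    | exact if_congr (by omega) rfl rfl
    | congr 1

theorem count_remove_and_accessable_rolls_eq (lines : List (List Int)) (nlines ncols : Int) :
    count_remove_and_accessable_rolls lines nlines ncols
      = count_remove_and_accessable_rolls_alt lines nlines ncols := by
  unfold count_remove_and_accessable_rolls count_remove_and_accessable_rolls_alt
  apply congrArg Prod.fst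
  apply PySem.List.foldl_congr_mem'
  intro i hi st
  apply PySem.List.foldl_congr_mem'
  intro j hj st'
  rw [PySem.List.mem_pyRange_one] at hi hj
  by_cases hv : PySem.List.pyGetD (PySem.List.pyGetD lines i []) j 0 = 1
  · simp only [pvVal_def] at hv ⊢
    simp only [hv, if_true, true_and]
    rw [pv_ite_chain3, pv_ite_chain3]
    simp only [pv_ite_step, zero_add]
    rw [pv_chain_eq_getD lines nlines ncols i j hi hj]
  · simp only [pvVal_def] at hv ⊢
    simp only [hv, if_false, false_and]

-- ===== VERDICT (by name: the statement is the Claim_ definition above) =====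
theorem count_remove_and_accessable_rolls_spec : Claim_equal_count_remove_and_accessable_rolls := by
  intro lines nlines ncols _ _
  unfold Spec_count_remove_and_accessable_rolls
  exact count_remove_and_accessable_rolls_eq lines nlines ncols
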